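-- pv_equiv track=rewrite | github.com/luojiayi001/CS412_term_project | add_things.py | show_pattern
-- ===== SOURCE A (Python) =====
-- def show_pattern(path2, words1, ent_dict):
--     words2 = []
--     words3 = []
--     path2.sort()
--     l = len(path2)
--     for i in range(0,l):
--         words2.append(words1[path2[i]])
--     count = 0
--     for i in range(0,l):
--         if count == 0:
--             found = 0
--             if words2[i] in ent_dict:
--                 found = 1
--                 words3.append('$'+ent_dict[words2[i]])
--             if (i<l-1):
--                 cur_key = words2[i]+' '+words2[i+1]
--                 if (cur_key in ent_dict):
--                     found = 1
--                     words3.append('$'+ent_dict[cur_key])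
--                     count = 1
--             if (i<l-2):
--                 cur_key = words2[i]+' '+words2[i+1]+' '+words2[i+2]
--                 if (cur_key in ent_dict):
--                     found = 1
--                     words3.append('$'+ent_dict[cur_key])
--                     count = 2
--             if (found == 0):
--                 words3.append(words2[i])
--         else:
--             count = count-1
--     return words3
-- ===== SOURCE B (Python) =====
-- def show_pattern(path2, words1, ent_dict):
--     # Staged: pass 1 precomputes tags/steps tables for every position, pass 2 selects.
--     # Like A, sorts path2 in place; return value equivalence only.
--     path2.sort()
--     words2 = [words1[j] for j in path2]
--     n = len(words2)
--     tags = []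
--     steps = []
--     for i in range(n):
--         hits = [k for k in (1, 2, 3)
--                 if i + k <= n and ' '.join(words2[i:i+k]) in ent_dict]
--         tags.append(['$' + ent_dict[' '.join(words2[i:i+k])] for k in hits]
--                     or [words2[i]])
--         steps.append(max(hits, default=1))
--     out = []
--     i = 0
--     while i < n:
--         out.extend(tags[i])
--         i += steps[i]
--     return out
-- ===== Notes on version B (the rewrite author's own statement) =====
-- stated objective: alternative
-- what changed: Replaces A's interleaved scan-with-skip-counter by two staged passes: pass 1 builds per-position tables of n-gram hit lengths, tag lists and jump steps for every position (via a join over list slices), pass 2 merely selects live positions by jumping through the steps table; control flow and matching are fully decoupled.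
import Mathlib
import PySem

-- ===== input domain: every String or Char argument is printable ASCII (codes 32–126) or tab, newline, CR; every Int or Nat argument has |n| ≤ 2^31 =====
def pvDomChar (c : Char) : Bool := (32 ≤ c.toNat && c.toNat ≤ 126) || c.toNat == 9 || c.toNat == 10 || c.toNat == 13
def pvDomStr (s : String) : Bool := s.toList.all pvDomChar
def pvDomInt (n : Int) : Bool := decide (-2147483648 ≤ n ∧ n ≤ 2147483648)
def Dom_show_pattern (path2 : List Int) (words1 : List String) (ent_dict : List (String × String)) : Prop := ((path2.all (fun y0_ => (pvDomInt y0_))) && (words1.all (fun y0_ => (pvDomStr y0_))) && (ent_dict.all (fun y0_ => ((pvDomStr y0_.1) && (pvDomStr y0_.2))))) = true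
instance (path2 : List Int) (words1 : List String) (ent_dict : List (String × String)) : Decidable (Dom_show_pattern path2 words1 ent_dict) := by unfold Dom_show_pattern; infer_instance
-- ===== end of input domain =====

-- B replaces A's interleaved scan-with-skip-counter by two staged passes: a table of per-position
-- n-gram hits/tags/steps for every position, then a selection jump through the tables (objective:
-- alternative decomposition). Return-value equivalence only as far as side effects go: both A and B
-- sort path2 in place identically.

-- ===== PORT A =====
-- one iteration of A's second `for i in range(0,l)` loop; state = (count, words3)
def showStep (d : PySem.Dict String String) (l : Nat) (ws : List String) (st : Int × List String) (i : Nat) : Int × List String :=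
  if st.1 = 0 then
    let wi := ws.getD i ""
    let found := d.contains wi
    let w3 := if d.contains wi then st.2 ++ ["$" ++ d.getD wi ""] else st.2
    let r2 :=
      if i < l - 1 then
        let k2 := wi ++ " " ++ ws.getD (i+1) ""
        if d.contains k2 then (true, w3 ++ ["$" ++ d.getD k2 ""], (1 : Int)) else (found, w3, (0 : Int))
      else (found, w3, (0 : Int))
    let r3 :=
      if i < l - 2 then
        let k3 := wi ++ " " ++ ws.getD (i+1) "" ++ " " ++ ws.getD (i+2) ""
        if d.contains k3 then (true, r2.2.1 ++ ["$" ++ d.getD k3 ""], (2 : Int)) else r2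
      else r2
    let w3f := if r3.1 = false then r3.2.1 ++ [wi] else r3.2.1
    (r3.2.2, w3f)
  else (st.1 - 1, st.2)

def show_pattern (path2 : List Int) (words1 : List String) (ent_dict : List (String × String)) : List String :=
  let d := PySem.Dict.ofList ent_dict
  let p := PySem.List.sorted path2 (fun x => x) false   -- path2.sort()
  let l := p.length
  -- first loop: words2.append(words1[path2[i]]); words1[j] raises outside Pre_, ported as pyGetD
  let words2 := (List.range l).foldl (fun acc i => acc ++ [PySem.List.pyGetD words1 (p.getD i 0) ""]) []
  (((List.range l).foldl (showStep d l words2) ((0 : Int), ([] : List String))).2)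

-- ===== PORT B =====
-- ' '.join(words2[i:i+k])
def phraseB (ws : List String) (i k : Nat) : String :=
  PySem.Str.join " " (PySem.List.slice ws (some (i : Int)) (some ((i : Int) + (k : Int))))

-- hits = [k for k in (1,2,3) if i+k <= n and ' '.join(words2[i:i+k]) in ent_dict]
def hitsB (d : PySem.Dict String String) (ws : List String) (i : Nat) : List Nat :=
  ([1, 2, 3] : List Nat).filter (fun k => decide (i + k ≤ ws.length) && d.contains (phraseB ws i k))

-- tags.append(['$'+ent_dict[' '.join(words2[i:i+k])] for k in hits] or [words2[i]])
def tagsB (d : PySem.Dict String String) (ws : List String) (i : Nat) : List String :=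
  let ts := (hitsB d ws i).map (fun k => "$" ++ d.getD (phraseB ws i k) "")
  if ts.isEmpty then [ws.getD i ""] else ts

-- steps.append(max(hits, default=1))
def stepB (d : PySem.Dict String String) (ws : List String) (i : Nat) : Nat :=
  (PySem.List.max? (hitsB d ws i) (fun k => k)).getD 1

-- stage 2: while i < n: out.extend(tags[i]); i += steps[i].  Fuel (= n) only makes the while loop
-- structural: each pass advances i by steps[i] ≥ 1, so n passes suffice.
def selB (tags : List (List String)) (steps : List Nat) (n : Nat) : Nat → Nat → List String → List String
  | 0, _, out => out
  | fuel+1, i, out =>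
    if i < n then selB tags steps n fuel (i + steps.getD i 1) (out ++ tags.getD i []) else out

def show_pattern_alt (path2 : List Int) (words1 : List String) (ent_dict : List (String × String)) : List String :=
  let d := PySem.Dict.ofList ent_dict
  let p := PySem.List.sorted path2 (fun x => x) false   -- path2.sort()
  let ws := p.map (fun j => PySem.List.pyGetD words1 j "")
  let n := ws.length
  let tags := (List.range n).map (tagsB d ws)    -- pass 1, tags.append(…)
  let steps := (List.range n).map (stepB d ws)   -- pass 1, steps.append(…)
  selB tags steps n n 0 []

-- ===== PRECONDITION & SPEC =====
-- Pre_ excludes exactly the inputs where Python A raises IndexError: some path2 entry is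
-- not a valid (possibly negative) index into words1.
def Pre_show_pattern (path2 : List Int) (words1 : List String) (ent_dict : List (String × String)) : Prop :=
  ∀ j ∈ path2, PySem.Raise.InRange words1.length j
instance (path2 : List Int) (words1 : List String) (ent_dict : List (String × String)) : Decidable (Pre_show_pattern path2 words1 ent_dict) := by unfold Pre_show_pattern; infer_instance

def pvWitness_show_pattern : List Int × List String × (List (String × String)) :=
  ([2, 0, 1, -1], ["new", "york", "city"], [("new york", "CITY"), ("new york city", "GPE"), ("city", "NOUN")])

def Spec_show_pattern (path2 : List Int) (words1 : List String) (ent_dict : List (String × String)) (out : List String) : Prop := out = show_pattern_alt path2 words1 ent_dict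
instance (path2 : List Int) (words1 : List String) (ent_dict : List (String × String)) (out : List String) : Decidable (Spec_show_pattern path2 words1 ent_dict out) := by unfold Spec_show_pattern; infer_instance

-- ===== CLAIM (what is proved, stated in full; the proofs are below) =====
def Claim_equal_show_pattern : Prop := ∀ (path2 : List Int) (words1 : List String) (ent_dict : List (String × String)), Dom_show_pattern path2 words1 ent_dict → Pre_show_pattern path2 words1 ent_dict → Spec_show_pattern path2 words1 ent_dict (show_pattern path2 words1 ent_dict)

-- ===== LEMMAS AND PROOFS =====

-- proof-side helpers: the tokens one live position emits and how far the head advances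
def appOf (d : PySem.Dict String String) (ws : List String) (i : Nat) : List String :=
  let w := ws.getD i ""
  let c1 := d.contains w
  let c2 := decide (i + 1 < ws.length) && d.contains (w ++ " " ++ ws.getD (i+1) "")
  let c3 := decide (i + 2 < ws.length) && d.contains (w ++ " " ++ ws.getD (i+1) "" ++ " " ++ ws.getD (i+2) "")
  ((if c1 then ["$" ++ d.getD w ""] else []) ++
   (if c2 then ["$" ++ d.getD (w ++ " " ++ ws.getD (i+1) "") ""] else []) ++
   (if c3 then ["$" ++ d.getD (w ++ " " ++ ws.getD (i+1) "" ++ " " ++ ws.getD (i+2) "") ""] else []) ++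
   (if c1 || c2 || c3 then [] else [w]))

def stepOf (d : PySem.Dict String String) (ws : List String) (i : Nat) : Nat :=
  let w := ws.getD i ""
  if decide (i + 2 < ws.length) && d.contains (w ++ " " ++ ws.getD (i+1) "" ++ " " ++ ws.getD (i+2) "") then 3
  else if decide (i + 1 < ws.length) && d.contains (w ++ " " ++ ws.getD (i+1) "") then 2
  else 1

-- abstract jump loop both sides reduce to
def altGo (d : PySem.Dict String String) (ws : List String) : Nat → Nat → List String → List String
  | 0, _, out => out
  | fuel+1, i, out =>
    if i < ws.length then altGo d ws fuel (i + stepOf d ws i) (out ++ appOf d ws i) else out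

lemma stepOf_pos (d : PySem.Dict String String) (ws : List String) (i : Nat) : 1 ≤ stepOf d ws i := by
  unfold stepOf; dsimp only; split_ifs <;> omega

set_option maxHeartbeats 4000000 in
set_option maxRecDepth 16384 in
lemma showStep_zero (d : PySem.Dict String String) (ws : List String) (acc : List String) (i : Nat) :
    showStep d ws.length ws (0, acc) i = ((stepOf d ws i : Int) - 1, acc ++ appOf d ws i) := by
  have e1 : (i < ws.length - 1) ↔ (i + 1 < ws.length) := by omega
  have e2 : (i < ws.length - 2) ↔ (i + 2 < ws.length) := by omega
  simp only [showStep, appOf, stepOf, Bool.and_eq_true, decide_eq_true_eq, e1, e2]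
  clear e1 e2
  generalize ws.getD (i+2) "" = w2
  generalize ws.getD (i+1) "" = w1
  generalize ws.getD i "" = w
  split_ifs <;> simp_all <;> omega

lemma skip_lemma (d : PySem.Dict String String) (ws : List String) (k : Nat) :
    ∀ (a n : Nat) (acc : List String), k ≤ n →
      List.foldl (showStep d ws.length ws) ((k : Int), acc) (List.range' a n)
        = List.foldl (showStep d ws.length ws) ((0 : Int), acc) (List.range' (a + k) (n - k)) := by
  induction k with
  | zero => intro a n acc _; simp
  | succ k ih =>
    intro a n acc hkn
    obtain ⟨m, rfl⟩ : ∃ m, n = m + 1 := ⟨n - 1, by omega⟩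
    rw [List.range'_succ, List.foldl_cons]
    have h1 : showStep d ws.length ws (((k + 1 : Nat) : Int), acc) a = ((k : Int), acc) := by
      unfold showStep
      rw [if_neg (by push_cast; omega)]
      simp
    rw [h1, ih (a+1) m acc (by omega),
        show a + 1 + k = a + (k + 1) by omega, show m - k = m + 1 - (k + 1) by omega]

set_option maxHeartbeats 1000000 in
lemma altGo_step (d : PySem.Dict String String) (ws : List String) (fuel i : Nat) (out : List String)
    (h : i < ws.length) :
    altGo d ws (fuel + 1) i out = altGo d ws fuel (i + stepOf d ws i) (out ++ appOf d ws i) := by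
  rw [altGo, if_pos h]

lemma main_lemma (d : PySem.Dict String String) (ws : List String) :
    ∀ (n : Nat), ∀ (fuel a : Nat) (acc : List String), a + n = ws.length → n ≤ fuel →
      (List.foldl (showStep d ws.length ws) ((0 : Int), acc) (List.range' a n)).2
        = altGo d ws fuel a acc := by
  intro n
  induction n using Nat.strong_induction_on with
  | h n ih =>
    intro fuel a acc hal hnf
    match n, fuel with
    | 0, 0 => simp [altGo]
    | 0, fuel+1 =>
      have : ¬ a < ws.length := by omega
      simp [altGo, this]
    | m+1, fuel+1 =>
      have ha : a < ws.length := by omega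
      rw [List.range'_succ, List.foldl_cons, showStep_zero d ws acc a,
          altGo_step d ws fuel a acc ha]
      have hs1 : 1 ≤ stepOf d ws a := stepOf_pos d ws a
      have hs3 : stepOf d ws a ≤ 3 := by unfold stepOf; dsimp only; split_ifs <;> omega
      have hsm : stepOf d ws a - 1 ≤ m := by
        unfold stepOf at *; dsimp only at *
        split_ifs with h3 h2
        · simp only [Bool.and_eq_true, decide_eq_true_eq] at h3; omega
        · simp only [Bool.and_eq_true, decide_eq_true_eq] at h2; omega
        · omega
      have hcast : (stepOf d ws a : Int) - 1 = ((stepOf d ws a - 1 : Nat) : Int) := by omega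
      rw [hcast, skip_lemma d ws (stepOf d ws a - 1) (a+1) m _ hsm]
      have harr : a + 1 + (stepOf d ws a - 1) = a + stepOf d ws a := by omega
      rw [harr]
      have g1 : m - (stepOf d ws a - 1) < m + 1 := by omega
      have g2 : a + stepOf d ws a + (m - (stepOf d ws a - 1)) = ws.length := by omega
      have g3 : m - (stepOf d ws a - 1) ≤ fuel := by omega
      exact ih (m - (stepOf d ws a - 1)) g1 fuel (a + stepOf d ws a) _ g2 g3

lemma words2_eq (words1 : List String) (p : List Int) :
    (List.range p.length).foldl (fun acc i => acc ++ [PySem.List.pyGetD words1 (p.getD i 0) ""]) []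
      = p.map (fun j => PySem.List.pyGetD words1 j "") := by
  rw [PySem.List.foldl_append_singleton_eq_map]
  have hid : (List.range p.length).map (fun i => p.getD i 0) = p := by
    apply List.ext_getElem <;> simp
    intro i h1 h2
    simp [List.getElem?_eq_getElem h2]
  calc (List.range p.length).map (fun i => PySem.List.pyGetD words1 (p.getD i 0) "")
      = ((List.range p.length).map (fun i => p.getD i 0)).map
          (fun j => PySem.List.pyGetD words1 j "") := by rw [List.map_map]; rfl
    _ = p.map (fun j => PySem.List.pyGetD words1 j "") := by rw [hid]

-- B-side: the join of a 1/2/3-element slice is the concatenated phrase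
lemma join_one (a : String) : PySem.Str.join " " [a] = a := by
  simp [PySem.Str.join, PySem.Chars.join, List.intercalate]

lemma join_two (a b : String) : PySem.Str.join " " [a, b] = a ++ " " ++ b := by
  simp [PySem.Str.join, PySem.Chars.join, List.intercalate]
  have h : (" " ++ b).toList = ' ' :: b.toList := by simp
  rw [← h, String.ofList_toList, ← String.append_assoc]

lemma join_three (a b c : String) :
    PySem.Str.join " " [a, b, c] = a ++ " " ++ b ++ " " ++ c := by
  simp [PySem.Str.join, PySem.Chars.join, List.intercalate]
  have h : (" " ++ b ++ (" " ++ c)).toList = ' ' :: (b.toList ++ ' ' :: c.toList) := by simp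
  rw [← h, String.ofList_toList]
  simp [String.append_assoc]

lemma phraseB_one (ws : List String) (i : Nat) (h : i + 1 ≤ ws.length) :
    phraseB ws i 1 = ws.getD i "" := by
  unfold phraseB
  rw [PySem.List.slice_natCast_add,
      List.drop_eq_getElem_cons (show i < ws.length by omega)]
  simp only [List.take_succ_cons, List.take_zero]
  rw [join_one]
  simp [List.getD_eq_getElem?_getD, List.getElem?_eq_getElem (show i < ws.length by omega)]

lemma phraseB_two (ws : List String) (i : Nat) (h : i + 2 ≤ ws.length) :
    phraseB ws i 2 = ws.getD i "" ++ " " ++ ws.getD (i+1) "" := by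
  unfold phraseB
  rw [PySem.List.slice_natCast_add,
      List.drop_eq_getElem_cons (show i < ws.length by omega),
      List.drop_eq_getElem_cons (show i + 1 < ws.length by omega)]
  simp only [List.take_succ_cons, List.take_zero]
  rw [join_two]
  simp [List.getD_eq_getElem?_getD,
    List.getElem?_eq_getElem (show i < ws.length by omega),
    List.getElem?_eq_getElem (show i + 1 < ws.length by omega)]

lemma phraseB_three (ws : List String) (i : Nat) (h : i + 3 ≤ ws.length) :
    phraseB ws i 3 = ws.getD i "" ++ " " ++ ws.getD (i+1) "" ++ " " ++ ws.getD (i+2) "" := by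
  unfold phraseB
  rw [PySem.List.slice_natCast_add,
      List.drop_eq_getElem_cons (show i < ws.length by omega),
      List.drop_eq_getElem_cons (show i + 1 < ws.length by omega),
      List.drop_eq_getElem_cons (show i + 2 < ws.length by omega)]
  simp only [List.take_succ_cons, List.take_zero]
  rw [join_three]
  simp [List.getD_eq_getElem?_getD,
    List.getElem?_eq_getElem (show i < ws.length by omega),
    List.getElem?_eq_getElem (show i + 1 < ws.length by omega),
    List.getElem?_eq_getElem (show i + 2 < ws.length by omega)]

set_option maxHeartbeats 4000000 in
lemma tagsB_eq_appOf (d : PySem.Dict String String) (ws : List String) (i : Nat)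
    (h : i < ws.length) : tagsB d ws i = appOf d ws i := by
  unfold tagsB hitsB appOf
  by_cases h2 : i + 2 ≤ ws.length
  · by_cases h3 : i + 3 ≤ ws.length
    · simp only [List.filter, phraseB_one ws i (by omega), phraseB_two ws i h2,
        phraseB_three ws i h3]
      simp only [show (i + 1 ≤ ws.length) = True by simp; omega,
        show (i + 2 ≤ ws.length) = True by simp; omega,
        show (i + 3 ≤ ws.length) = True by simp; omega,
        show (i + 1 < ws.length) = True by simp; omega,
        show (i + 2 < ws.length) = True by simp; omega, decide_true, Bool.true_and]
      cases d.contains (ws.getD i "") <;>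
        cases d.contains (ws.getD i "" ++ " " ++ ws.getD (i+1) "") <;>
          cases d.contains (ws.getD i "" ++ " " ++ ws.getD (i+1) "" ++ " " ++ ws.getD (i+2) "") <;>
            simp [phraseB_one ws i (by omega), phraseB_two ws i h2, phraseB_three ws i h3]
    · simp only [List.filter, phraseB_one ws i (by omega), phraseB_two ws i h2]
      simp only [show (i + 1 ≤ ws.length) = True by simp; omega,
        show (i + 2 ≤ ws.length) = True by simp; omega,
        show (i + 3 ≤ ws.length) = False by simp; omega,
        show (i + 1 < ws.length) = True by simp; omega,
        show (i + 2 < ws.length) = False by simp; omega,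
        decide_true, decide_false, Bool.true_and, Bool.false_and]
      cases d.contains (ws.getD i "") <;>
        cases d.contains (ws.getD i "" ++ " " ++ ws.getD (i+1) "") <;>
          simp [phraseB_one ws i (by omega), phraseB_two ws i h2]
  · have h3 : ¬ i + 3 ≤ ws.length := by omega
    simp only [List.filter, phraseB_one ws i (by omega)]
    simp only [show (i + 1 ≤ ws.length) = True by simp; omega,
      show (i + 2 ≤ ws.length) = False by simp; omega,
      show (i + 3 ≤ ws.length) = False by simp; omega,
      show (i + 1 < ws.length) = False by simp; omega,
      show (i + 2 < ws.length) = False by simp; omega,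
      decide_true, decide_false, Bool.true_and, Bool.false_and]
    cases d.contains (ws.getD i "") <;> simp [phraseB_one ws i (by omega)]

set_option maxHeartbeats 4000000 in
lemma stepB_eq_stepOf (d : PySem.Dict String String) (ws : List String) (i : Nat)
    (h : i < ws.length) : stepB d ws i = stepOf d ws i := by
  unfold stepB hitsB stepOf
  by_cases h2 : i + 2 ≤ ws.length
  · by_cases h3 : i + 3 ≤ ws.length
    · simp only [List.filter, phraseB_two ws i h2, phraseB_three ws i h3]
      simp only [show (i + 1 ≤ ws.length) = True by simp; omega,
        show (i + 2 ≤ ws.length) = True by simp; omega,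
        show (i + 3 ≤ ws.length) = True by simp; omega,
        show (i + 1 < ws.length) = True by simp; omega,
        show (i + 2 < ws.length) = True by simp; omega, decide_true, Bool.true_and]
      cases d.contains (phraseB ws i 1) <;>
        cases d.contains (ws.getD i "" ++ " " ++ ws.getD (i+1) "") <;>
          cases d.contains (ws.getD i "" ++ " " ++ ws.getD (i+1) "" ++ " " ++ ws.getD (i+2) "") <;>
            simp [PySem.List.max?]
    · simp only [List.filter, phraseB_two ws i h2]
      simp only [show (i + 1 ≤ ws.length) = True by simp; omega,
        show (i + 2 ≤ ws.length) = True by simp; omega,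
        show (i + 3 ≤ ws.length) = False by simp; omega,
        show (i + 1 < ws.length) = True by simp; omega,
        show (i + 2 < ws.length) = False by simp; omega,
        decide_true, decide_false, Bool.true_and, Bool.false_and]
      cases d.contains (phraseB ws i 1) <;>
        cases d.contains (ws.getD i "" ++ " " ++ ws.getD (i+1) "") <;> simp [PySem.List.max?]
  · have h3 : ¬ i + 3 ≤ ws.length := by omega
    simp only [List.filter]
    simp only [show (i + 1 ≤ ws.length) = True by simp; omega,
      show (i + 2 ≤ ws.length) = False by simp; omega,
      show (i + 3 ≤ ws.length) = False by simp; omega,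
      show (i + 1 < ws.length) = False by simp; omega,
      show (i + 2 < ws.length) = False by simp; omega,
      decide_true, decide_false, Bool.true_and, Bool.false_and]
    cases d.contains (phraseB ws i 1) <;> simp [PySem.List.max?]

lemma getD_map_range {α : Type} (f : Nat → α) (n i : Nat) (dflt : α) (h : i < n) :
    ((List.range n).map f).getD i dflt = f i := by
  simp [List.getD_eq_getElem?_getD, h]

lemma selB_eq_altGo (d : PySem.Dict String String) (ws : List String) :
    ∀ (fuel i : Nat) (out : List String),
      selB ((List.range ws.length).map (tagsB d ws)) ((List.range ws.length).map (stepB d ws))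
        ws.length fuel i out = altGo d ws fuel i out := by
  intro fuel
  induction fuel with
  | zero => intro i out; rfl
  | succ fuel ih =>
    intro i out
    by_cases h : i < ws.length
    · rw [selB, if_pos h, altGo, if_pos h,
        getD_map_range (tagsB d ws) ws.length i [] h,
        getD_map_range (stepB d ws) ws.length i 1 h,
        tagsB_eq_appOf d ws i h, stepB_eq_stepOf d ws i h, ih]
    · rw [selB, if_neg h, altGo, if_neg h]

-- ===== VERDICT (by name: the statement is the Claim_ definition above) =====
theorem show_pattern_spec : Claim_equal_show_pattern := by
  intro path2 words1 ent_dict _ _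
  unfold Spec_show_pattern show_pattern show_pattern_alt
  dsimp only
  rw [words2_eq]
  set p := PySem.List.sorted path2 (fun x => x) false with hp
  set ws := p.map (fun j => PySem.List.pyGetD words1 j "") with hws
  have hlen : p.length = ws.length := by simp [hws]
  rw [hlen, selB_eq_altGo, List.range_eq_range']
  exact main_lemma (PySem.Dict.ofList ent_dict) ws ws.length ws.length 0 [] (by omega) (by omega)
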